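-- pv_equiv track=rewrite | github.com/Antoskacz/Testool | app.py | clean_tc_name
-- ===== SOURCE A (Python) =====
-- def clean_tc_name(name: str) -> str:
--     """
--     Odstraní části 'UNKNOWN' z názvu ticketu a opraví duplicitní podtržítka.
--     """
--     if not name or not isinstance(name, str):
--         return name
--
--     parts = name.split('_')
--     cleaned_parts = [p for p in parts if p != 'UNKNOWN']
--     result = '_'.join(cleaned_parts)
--
--     # Opravit případné duplicitní podtržítka
--     while '__' in result:
--         result = result.replace('__', '_')
--
--     # Odebrat podtržítka na začátku/konci
--     result = result.strip('_')
--
--     return result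
-- ===== SOURCE B (Python) =====
-- def clean_tc_name(name: str) -> str:
--     """
--     Odstraní části 'UNKNOWN' z názvu ticketu a opraví duplicitní podtržítka.
--     """
--     if not name or not isinstance(name, str):
--         return name
--     return '_'.join(p for p in name.split('_') if p and p != 'UNKNOWN')
-- ===== Notes on version B (the rewrite author's own statement) =====
-- stated objective: simpler
-- what changed: The join/collapse-loop/strip pipeline is replaced by a single filtering pass: split on '_' and drop tokens that are empty or 'UNKNOWN', then join once; the whole while-'__'-replace loop and the final strip disappear.
import Mathlib
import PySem

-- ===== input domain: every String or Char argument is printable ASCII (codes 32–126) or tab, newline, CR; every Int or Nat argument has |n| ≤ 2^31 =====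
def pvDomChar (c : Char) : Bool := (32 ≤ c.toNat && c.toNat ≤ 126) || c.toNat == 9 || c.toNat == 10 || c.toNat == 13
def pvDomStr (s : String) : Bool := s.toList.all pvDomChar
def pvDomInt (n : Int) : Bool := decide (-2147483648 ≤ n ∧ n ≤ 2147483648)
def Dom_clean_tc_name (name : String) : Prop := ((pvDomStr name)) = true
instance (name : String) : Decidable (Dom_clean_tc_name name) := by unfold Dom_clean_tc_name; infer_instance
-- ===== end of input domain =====

-- B replaces A's join + while-'__'-collapse loop + strip by one filtering pass (drop empty and 'UNKNOWN' tokens); return values proved equal for all strings.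

-- ===== PORT A =====
-- Length bounds on the replace loop body, needed only for cleanLoopA's termination (cited in its decreasing_by).
theorem pvReplaceGo_len_le (fuel : Nat) (l acc : List Char) :
    (PySem.Chars.replace.go ['_', '_'] ['_'] fuel l acc).length ≤ acc.length + l.length := by
  induction fuel generalizing l acc with
  | zero => simp [PySem.Chars.replace.go]
  | succ n ih =>
    cases l with
    | nil => simp [PySem.Chars.replace.go]
    | cons c t =>
      rw [PySem.Chars.replace.go]
      split
      · rename_i hp
        have hpre : ['_', '_'] <+: c :: t := List.isPrefixOf_iff_prefix.mp hp
        obtain ⟨r, hr⟩ := hpre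
        obtain ⟨rfl, rfl⟩ : c = '_' ∧ t = '_' :: r := by
          simpa using hr.symm
        have := ih (List.drop 2 ('_' :: '_' :: r)) (['_'].reverse ++ acc)
        simp at this ⊢
        omega
      · have := ih t (c :: acc)
        simp at this ⊢
        omega

theorem pvReplaceGo_len_lt (fuel : Nat) (l acc : List Char) (hf : l.length ≤ fuel)
    (hin : ['_', '_'] <:+: l) :
    (PySem.Chars.replace.go ['_', '_'] ['_'] fuel l acc).length < acc.length + l.length := by
  induction fuel generalizing l acc with
  | zero =>
    have : l = [] := by cases l <;> simp_all
    subst this; simp at hin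
  | succ n ih =>
    cases l with
    | nil => simp at hin
    | cons c t =>
      rw [PySem.Chars.replace.go]
      split
      · rename_i hp
        have hpre : ['_', '_'] <+: c :: t := List.isPrefixOf_iff_prefix.mp hp
        obtain ⟨r, hr⟩ := hpre
        obtain ⟨rfl, rfl⟩ : c = '_' ∧ t = '_' :: r := by
          simpa using hr.symm
        have := pvReplaceGo_len_le n (List.drop 2 ('_' :: '_' :: r)) (['_'].reverse ++ acc)
        simp at this ⊢
        omega
      · rename_i hp
        have hint : ['_', '_'] <:+: t := by
          rcases List.infix_cons_iff.mp hin with h | h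
          · exact absurd (List.isPrefixOf_iff_prefix.mpr h) (by simp_all)
          · exact h
        have := ih t (c :: acc) (by simp at hf ⊢; omega) hint
        simp at this ⊢
        omega

theorem pvReplace_len_lt (s : String) (h : PySem.Str.isIn "__" s = true) :
    (PySem.Str.replace s "__" "_").toList.length < s.toList.length := by
  rw [PySem.Str.toList_replace]
  have hin : ['_', '_'] <:+: s.toList := by
    have := (PySem.Chars.isIn_iff_infix ("__".toList) s.toList).mp h
    simpa using this
  have h2 : 2 ≤ s.toList.length := hin.length_le
  have := pvReplaceGo_len_lt s.toList.length s.toList [] (le_refl _) hin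
  simpa [PySem.Chars.replace, show ("__".toList ≠ []) by decide, List.isEmpty_iff] using this

-- while '__' in result: result = result.replace('__', '_')
def cleanLoopA (s : String) : String :=
  if PySem.Str.isIn "__" s then cleanLoopA (PySem.Str.replace s "__" "_") else s
termination_by s.toList.length
decreasing_by exact pvReplace_len_lt s (by assumption)

def clean_tc_name (name : String) : String :=
  if name == "" then name
  else
    let parts := (PySem.Str.split? name "_").getD []
    let cleaned_parts := parts.filter (fun p => p ≠ "UNKNOWN")
    let result := PySem.Str.join "_" cleaned_parts
    let result := cleanLoopA result
    PySem.Str.stripChars result "_"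

-- ===== PORT B =====
def clean_tc_name_alt (name : String) : String :=
  if name == "" then name
  else
    PySem.Str.join "_"
      (((PySem.Str.split? name "_").getD []).filter (fun p => p ≠ "" && p ≠ "UNKNOWN"))

-- ===== PRECONDITION & SPEC =====
def Spec_clean_tc_name (name : String) (out : String) : Prop := out = clean_tc_name_alt name
instance (name : String) (out : String) : Decidable (Spec_clean_tc_name name out) := by unfold Spec_clean_tc_name; infer_instance

-- ===== CLAIM (what is proved, stated in full; the proofs are below) =====
def Claim_equal_clean_tc_name : Prop := ∀ (name : String), Dom_clean_tc_name name → Spec_clean_tc_name name (clean_tc_name name)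

-- ===== LEMMAS AND PROOFS =====

-- tokens of a string split on '_'
def spU : List Char → List (List Char)
  | [] => [[]]
  | c :: t =>
    if c = '_' then [] :: spU t
    else
      match spU t with
      | r :: rs => (c :: r) :: rs
      | [] => [[c]]

theorem spU_ne_nil (l : List Char) : spU l ≠ [] := by
  cases l with
  | nil => simp [spU]
  | cons c t =>
    simp only [spU]
    split
    · simp
    · split <;> simp

theorem spU_underscore (t : List Char) : spU ('_' :: t) = [] :: spU t := by simp [spU]

theorem spU_cons {c : Char} (t : List Char) (hc : c ≠ '_') :
    spU (c :: t) = (c :: (spU t).headI) :: (spU t).tail := by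
  simp only [spU]
  rw [if_neg hc]
  rcases h : spU t with _ | ⟨r, rs⟩
  · exact absurd h (spU_ne_nil t)
  · simp

def mapHeadF (f : List Char → List Char) : List (List Char) → List (List Char)
  | [] => []
  | x :: xs => f x :: xs

theorem splitOnGo_eq_spU (fuel : Nat) (l cur : List Char) (acc : List (List Char))
    (hf : l.length < fuel) :
    PySem.Chars.splitOn.go ['_'] fuel l cur acc
      = acc.reverse ++ mapHeadF (cur.reverse ++ ·) (spU l) := by
  induction fuel generalizing l cur acc with
  | zero => omega
  | succ n ih =>
    cases l with
    | nil => simp [PySem.Chars.splitOn.go.eq_def, spU, mapHeadF]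
    | cons c rest =>
      rw [PySem.Chars.splitOn.go.eq_def]
      simp only []
      by_cases hc : c = '_'
      · subst hc
        rw [if_pos (by simp [List.isPrefixOf])]
        rw [ih _ _ _ (by simp at hf ⊢; omega)]
        have hm : mapHeadF (fun x => List.reverse [] ++ x) (spU rest) = spU rest := by
          cases spU rest <;> simp [mapHeadF]
        simp only [show List.drop ['_'].length ('_' :: rest) = rest from rfl, hm, spU_underscore]
        simp [mapHeadF]
      · rw [if_neg (by simp [List.isPrefixOf]; exact fun h => hc h.symm)]
        rw [ih _ _ _ (by simp at hf ⊢; omega)]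
        rw [spU_cons rest hc]
        rcases h : spU rest with _ | ⟨r, rs⟩
        · exact absurd h (spU_ne_nil rest)
        · simp [mapHeadF]

theorem splitOn_eq_spU (l : List Char) : PySem.Chars.splitOn l ['_'] = spU l := by
  rw [PySem.Chars.splitOn, splitOnGo_eq_spU _ _ _ _ (by omega)]
  cases h : spU l <;> simp [mapHeadF]

-- single replace pass
def repU : List Char → List Char
  | '_' :: '_' :: t => '_' :: repU t
  | c :: t => c :: repU t
  | [] => []

theorem repU_cons {c : Char} {t : List Char}
    (h : ∀ t', c = '_' → t = '_' :: t' → False) : repU (c :: t) = c :: repU t := by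
  rw [repU.eq_def]
  split
  · rename_i t' heq
    obtain ⟨h1, h2⟩ := (List.cons.injEq _ _ _ _).mp heq
    exact (h t' h1 h2).elim
  · rename_i heq
    obtain ⟨h1, h2⟩ := (List.cons.injEq _ _ _ _).mp heq
    rw [h1, h2]
  · rename_i heq
    exact absurd heq (by simp)

theorem replaceGo_eq_repU (fuel : Nat) (l acc : List Char) (hf : l.length ≤ fuel) :
    PySem.Chars.replace.go ['_', '_'] ['_'] fuel l acc = acc.reverse ++ repU l := by
  induction fuel generalizing l acc with
  | zero =>
    have : l = [] := by cases l <;> simp_all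
    subst this; simp [PySem.Chars.replace.go, repU]
  | succ n ih =>
    cases l with
    | nil => simp [PySem.Chars.replace.go, repU]
    | cons c t =>
      rw [PySem.Chars.replace.go]
      split
      · rename_i hp
        obtain ⟨r, hr⟩ := List.isPrefixOf_iff_prefix.mp hp
        obtain ⟨rfl, rfl⟩ : c = '_' ∧ t = '_' :: r := by simpa using hr.symm
        rw [ih _ _ (by simp at hf ⊢; omega)]
        simp [repU]
      · rename_i hp
        rw [ih _ _ (by simp at hf ⊢; omega)]
        rw [repU_cons (fun t' h1 h2 => hp (by rw [h1, h2]; simp [List.isPrefixOf]))]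
        simp

theorem replace_eq_repU (l : List Char) :
    PySem.Chars.replace l ['_', '_'] ['_'] = repU l := by
  rw [PySem.Chars.replace, if_neg (by simp), replaceGo_eq_repU _ _ _ (le_refl _)]
  simp

-- a replace pass preserves the head token and the multiset-free list of nonempty tokens
theorem repU_pres (l : List Char) :
    (spU (repU l)).headI = (spU l).headI ∧
      (spU (repU l)).filter (· ≠ []) = (spU l).filter (· ≠ []) := by
  induction l using repU.induct with
  | case1 t ih =>
    rw [show repU ('_' :: '_' :: t) = '_' :: repU t from rfl]
    rw [spU_underscore, spU_underscore, spU_underscore]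
    simpa using ih.2
  | case2 c t h ih =>
    rw [repU_cons h]
    by_cases hc : c = '_'
    · subst hc
      rw [spU_underscore, spU_underscore]
      simpa using ih.2
    · rw [spU_cons _ hc, spU_cons _ hc]
      obtain ⟨ih1, ih2⟩ := ih
      rcases h1 : spU t with _ | ⟨r, rs⟩
      · exact absurd h1 (spU_ne_nil t)
      rcases h2 : spU (repU t) with _ | ⟨r', rs'⟩
      · exact absurd h2 (spU_ne_nil (repU t))
      rw [h1, h2] at ih1 ih2
      simp only [List.headI] at ih1
      subst ih1
      have htl : rs'.filter (· ≠ []) = rs.filter (· ≠ []) := by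
        by_cases hr : r' = []
        · subst hr; simpa using ih2
        · rw [List.filter_cons, List.filter_cons, if_pos (by simpa using hr),
            if_pos (by simpa using hr)] at ih2
          exact ((List.cons.injEq _ _ _ _).mp ih2).2
      refine ⟨by simp, ?_⟩
      simp only [List.tail_cons]
      simpa using htl
  | case3 => simp [repU]

-- the collapse loop at the character level
theorem replace_len_lt (l : List Char) (h : ['_', '_'] <:+: l) :
    (PySem.Chars.replace l ['_', '_'] ['_']).length < l.length := by
  have h2 : 2 ≤ l.length := h.length_le
  have := pvReplaceGo_len_lt l.length l [] (le_refl _) h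
  simpa [PySem.Chars.replace, List.isEmpty_iff] using this

def collapseU (l : List Char) : List Char :=
  if PySem.Chars.isIn ['_', '_'] l then collapseU (PySem.Chars.replace l ['_', '_'] ['_']) else l
termination_by l.length
decreasing_by exact replace_len_lt l ((PySem.Chars.isIn_iff_infix _ _).mp (by assumption))

theorem cleanLoopA_toList (s : String) : (cleanLoopA s).toList = collapseU s.toList := by
  induction s using cleanLoopA.induct with
  | case1 s hin ih =>
    have hb : ("__" : String).toList = ['_', '_'] := by decide
    have hb2 : ("_" : String).toList = ['_'] := by decide
    have hin' : PySem.Chars.isIn ['_', '_'] s.toList = true := by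
      rw [← hb]; exact hin
    rw [cleanLoopA, if_pos hin, ih]
    conv_rhs => rw [collapseU]
    rw [if_pos hin', PySem.Str.toList_replace, hb, hb2]
  | case2 s hin =>
    have hb : ("__" : String).toList = ['_', '_'] := by decide
    have hin' : ¬ PySem.Chars.isIn ['_', '_'] s.toList = true := by
      rw [← hb]; exact fun hx => hin hx
    rw [cleanLoopA, if_neg hin]
    conv_rhs => rw [collapseU]
    rw [if_neg hin']

-- join inverts split
theorem join_spU (l : List Char) : PySem.Chars.join ['_'] (spU l) = l := by
  induction l with
  | nil => decide
  | cons c t ih =>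
    by_cases hc : c = '_'
    · subst hc
      rw [spU_underscore]
      rcases h : spU t with _ | ⟨r, rs⟩
      · exact absurd h (spU_ne_nil t)
      · rw [h] at ih
        rw [PySem.Chars.join_cons_cons, ih]
        simp
    · rw [spU_cons _ hc]
      rcases h : spU t with _ | ⟨r, rs⟩
      · exact absurd h (spU_ne_nil t)
      · rw [h] at ih
        simp only [List.headI, List.tail_cons]
        rcases rs with _ | ⟨r2, rs2⟩
        · rw [PySem.Chars.join_singleton] at ih ⊢
          rw [ih]
        · rw [PySem.Chars.join_cons_cons] at ih ⊢
          rw [← ih]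
          simp

theorem headI_mem_of_ne_nil {α : Type} [Inhabited α] (l : List α) (h : l ≠ []) :
    l.headI ∈ l := by
  cases l with
  | nil => exact absurd rfl h
  | cons a t => simp [List.headI]

-- tokens contain no underscore
theorem spU_no_underscore (l : List Char) : ∀ p ∈ spU l, '_' ∉ p := by
  induction l with
  | nil => simp [spU]
  | cons c t ih =>
    by_cases hc : c = '_'
    · subst hc
      rw [spU_underscore]
      intro p hp
      rw [List.mem_cons] at hp
      rcases hp with h | h
      · simp [h]
      · exact ih _ h
    · rw [spU_cons _ hc]
      intro p hp
      rw [List.mem_cons] at hp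
      rcases hp with h | h
      · subst h
        intro hm
        rw [List.mem_cons] at hm
        rcases hm with hm | hm
        · exact hc hm.symm
        · exact ih _ (headI_mem_of_ne_nil _ (spU_ne_nil t)) hm
      · exact ih p (List.mem_of_mem_tail h)

theorem spU_of_no_underscore (q : List Char) (h : '_' ∉ q) : spU q = [q] := by
  induction q with
  | nil => simp [spU]
  | cons c t ih =>
    have hc : c ≠ '_' := fun hc => h (by simp [hc])
    rw [spU_cons _ hc, ih (fun ht => h (by simp [ht]))]
    simp

theorem spU_append_underscore (q r : List Char) (h : '_' ∉ q) :
    spU (q ++ '_' :: r) = q :: spU r := by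
  induction q with
  | nil => simpa using spU_underscore r
  | cons c t ih =>
    have hc : c ≠ '_' := fun hc => h (by simp [hc])
    rw [List.cons_append, spU_cons _ hc, ih (fun ht => h (by simp [ht]))]
    simp

theorem spU_join (qs : List (List Char)) (hne : qs ≠ []) (hq : ∀ q ∈ qs, '_' ∉ q) :
    spU (PySem.Chars.join ['_'] qs) = qs := by
  induction qs with
  | nil => exact absurd rfl hne
  | cons q rest ih =>
    rcases rest with _ | ⟨q2, rest2⟩
    · rw [PySem.Chars.join_singleton]
      exact spU_of_no_underscore q (hq q (by simp))
    · rw [PySem.Chars.join_cons_cons]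
      rw [show q ++ ['_'] ++ PySem.Chars.join ['_'] (q2 :: rest2)
            = q ++ '_' :: PySem.Chars.join ['_'] (q2 :: rest2) by simp]
      rw [spU_append_underscore _ _ (hq q (by simp))]
      rw [ih (by simp) (fun x hx => hq x (by simp [hx]))]

-- appending / prepending an underscore
theorem spU_concat_underscore (u : List Char) : spU (u ++ ['_']) = spU u ++ [[]] := by
  induction u with
  | nil => simp [spU]
  | cons c t ih =>
    by_cases hc : c = '_'
    · subst hc
      rw [List.cons_append, spU_underscore, spU_underscore, ih]
      simp
    · rw [List.cons_append, spU_cons _ hc, spU_cons _ hc, ih]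
      rcases h : spU t with _ | ⟨r, rs⟩
      · exact absurd h (spU_ne_nil t)
      · simp

theorem strip_concat_underscore (u : List Char) :
    PySem.Chars.stripChars (u ++ ['_']) ['_'] = PySem.Chars.stripChars u ['_'] := by
  simp only [PySem.Chars.stripChars, List.dropWhile_append]
  by_cases h : (List.dropWhile (fun c => List.contains ['_'] c) u).isEmpty
  · rw [if_pos h]
    rw [List.isEmpty_iff] at h
    rw [h]
    simp
  · rw [if_neg h]
    simp

theorem strip_cons_underscore (t : List Char) :
    PySem.Chars.stripChars ('_' :: t) ['_'] = PySem.Chars.stripChars t ['_'] := by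
  simp [PySem.Chars.stripChars]

-- tail tokens are nonempty for a string without "__" not ending in '_'
theorem spU_tail_ne_nil (l : List Char) (hinf : ¬ (['_', '_'] <:+: l))
    (hlast : l.getLast? ≠ some '_') : ∀ p ∈ (spU l).tail, p ≠ [] := by
  induction l with
  | nil => simp [spU]
  | cons c t ih =>
    by_cases hc : c = '_'
    · subst hc
      rw [spU_underscore, List.tail_cons]
      rcases t with _ | ⟨c2, t2⟩
      · simp at hlast
      · have hc2 : c2 ≠ '_' := by
          intro h; subst h
          exact hinf ⟨[], t2, by simp⟩
        rw [spU_cons _ hc2]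
        intro p hp
        rw [List.mem_cons] at hp
        rcases hp with h | h
        · simp [h]
        · have ht : ∀ p ∈ (spU (c2 :: t2)).tail, p ≠ [] :=
            ih (fun hi => hinf (List.infix_cons_iff.mpr (Or.inr hi)))
              (by rwa [List.getLast?_cons_cons] at hlast)
          exact ht p (by rw [spU_cons _ hc2]; exact h)
    · rw [spU_cons _ hc, List.tail_cons]
      rcases t with _ | ⟨c2, t2⟩
      · simp [spU]
      · exact fun p hp => ih (fun hi => hinf (List.infix_cons_iff.mpr (Or.inr hi)))
          (by rwa [List.getLast?_cons_cons] at hlast) p hp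

-- strip on a string without "__" keeps exactly the nonempty tokens
theorem stripU_eq (n : Nat) : ∀ l : List Char, l.length ≤ n → ¬ (['_', '_'] <:+: l) →
    PySem.Chars.stripChars l ['_'] = PySem.Chars.join ['_'] ((spU l).filter (· ≠ [])) := by
  induction n with
  | zero =>
    intro l hl _
    have : l = [] := by cases l <;> simp_all
    subst this
    decide
  | succ n ih =>
    intro l hl hinf
    rcases l with _ | ⟨c, t⟩
    · decide
    by_cases hc : c = '_'
    · subst hc
      rw [strip_cons_underscore, spU_underscore]
      rw [ih t (by simp at hl; omega) (fun hi => hinf (List.infix_cons_iff.mpr (Or.inr hi)))]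
      simp
    by_cases hlast : (c :: t).getLast? = some '_'
    · obtain ⟨u, hu⟩ : ∃ u, c :: t = u ++ ['_'] := by
        refine ⟨(c :: t).dropLast, ?_⟩
        have hne : (c :: t) ≠ [] := by simp
        have hd := List.dropLast_append_getLast hne
        have hg : (c :: t).getLast hne = '_' := by
          have h' := List.getLast?_eq_some_getLast hne
          rw [h'] at hlast
          exact Option.some.inj hlast
        conv_lhs => rw [← hd]
        rw [hg]
      rw [hu, strip_concat_underscore, spU_concat_underscore]
      have hlen : u.length ≤ n := by
        have hlu : (c :: t).length = u.length + 1 := by rw [hu]; simp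
        simp only [List.length_cons] at hlu hl
        omega
      have hinfu : ¬ (['_', '_'] <:+: u) := fun hi => hinf (by
        rw [hu]
        exact hi.trans ⟨[], ['_'], by simp⟩)
      rw [ih u hlen hinfu]
      simp
    · -- neither starts nor ends with '_': strip is the identity and all tokens are nonempty
      have h1 : List.dropWhile (fun x => List.contains ['_'] x) (c :: t) = c :: t := by
        rw [List.dropWhile_cons_of_neg]
        simpa using hc
      have h2 : List.dropWhile (fun x => List.contains ['_'] x) (c :: t).reverse = (c :: t).reverse := by
        rcases h : (c :: t).reverse with _ | ⟨d, r⟩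
        · simp at h
        · rw [List.dropWhile_cons_of_neg]
          have hdl : (c :: t).getLast? = some d := by
            rw [← List.head?_reverse, h]; rfl
          simp only [List.contains_eq_mem, List.mem_singleton, decide_eq_true_eq]
          intro hd; subst hd
          exact hlast hdl
      have hstrip : PySem.Chars.stripChars (c :: t) ['_'] = c :: t := by
        simp only [PySem.Chars.stripChars]
        rw [h1, h2]
        simp
      have hall : (spU (c :: t)).filter (· ≠ []) = spU (c :: t) := by
        rw [List.filter_eq_self]
        intro p hp
        rcases h3 : spU (c :: t) with _ | ⟨r, rs⟩
        · exact absurd h3 (spU_ne_nil _)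
        rw [h3, List.mem_cons] at hp
        rcases hp with h | h
        · rw [spU_cons _ hc] at h3
          obtain ⟨hr, _⟩ := (List.cons.injEq _ _ _ _).mp h3
          rw [h, ← hr]
          simp
        · have := spU_tail_ne_nil (c :: t) hinf hlast p (by rw [h3]; exact h)
          simpa using this
      rw [hstrip, hall, join_spU]

-- collapse + strip = keep the nonempty tokens
theorem collapse_strip_eq (l : List Char) :
    PySem.Chars.stripChars (collapseU l) ['_'] = PySem.Chars.join ['_'] ((spU l).filter (· ≠ [])) := by
  induction l using collapseU.induct with
  | case1 l hin ih =>
    rw [collapseU, if_pos hin, ih, replace_eq_repU, (repU_pres l).2]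
  | case2 l hin =>
    rw [collapseU, if_neg hin]
    exact stripU_eq l.length l (le_refl _) (fun hi => hin ((PySem.Chars.isIn_iff_infix _ _).mpr hi))

-- string-level split characterisation
theorem split_eq_spU (name : String) :
    (PySem.Str.split? name "_").getD [] = (spU name.toList).map String.ofList := by
  rw [PySem.Str.split?]
  simp only [PySem.Chars.split?, show (("_" : String).toList = ['_']) from rfl]
  rw [if_neg (by simp)]
  rw [splitOn_eq_spU]
  simp

theorem toList_inj (a b : String) (h : a.toList = b.toList) : a = b := by
  have := congrArg String.ofList h
  simpa using this

-- ===== VERDICT (by name: the statement is the Claim_ definition above) =====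
theorem clean_tc_name_spec : Claim_equal_clean_tc_name := by
  unfold Claim_equal_clean_tc_name Spec_clean_tc_name
  intro name _
  by_cases hne : name == ""
  · rw [clean_tc_name, clean_tc_name_alt, if_pos hne, if_pos hne]
  rw [clean_tc_name, clean_tc_name_alt, if_neg hne, if_neg hne]
  apply toList_inj
  rw [PySem.Str.toList_stripChars, cleanLoopA_toList, PySem.Str.toList_join,
    PySem.Str.toList_join, split_eq_spU]
  have hb : ("_" : String).toList = ['_'] := by decide
  rw [hb]
  have hofl : ∀ (p q : List Char), String.ofList p = String.ofList q ↔ p = q := by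
    intro p q
    constructor
    · intro h; have := congrArg String.toList h; simpa using this
    · intro h; rw [h]
  have hA : (((spU name.toList).map String.ofList).filter (fun p => p ≠ "UNKNOWN")).map
        String.toList
      = (spU name.toList).filter (fun p => p ≠ ("UNKNOWN" : String).toList) := by
    rw [List.filter_map, List.map_map]
    have hid : String.toList ∘ String.ofList = id := funext (fun l => by simp)
    rw [hid, List.map_id]
    apply List.filter_congr
    intro p _
    simp only [Function.comp_apply, ne_eq, decide_eq_decide]
    constructor
    · intro h hp; exact h (by rw [hp]; simp)
    · intro h hp
      exact h (by have := (hofl p ("UNKNOWN" : String).toList).mp (by simpa using hp); exact this)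
  have hB : (((spU name.toList).map String.ofList).filter
        (fun p => p ≠ "" && p ≠ "UNKNOWN")).map String.toList
      = (spU name.toList).filter
          (fun p => p ≠ ([] : List Char) && p ≠ ("UNKNOWN" : String).toList) := by
    rw [List.filter_map, List.map_map]
    have hid : String.toList ∘ String.ofList = id := funext (fun l => by simp)
    rw [hid, List.map_id]
    apply List.filter_congr
    intro p _
    simp only [Function.comp_apply, ne_eq]
    congr 1
    · simp only [decide_eq_decide]
      constructor
      · intro h hp; exact h (by simp [hp])
      · intro h hp
        exact h ((hofl p ([] : List Char)).mp (by simpa using hp))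
    · simp only [decide_eq_decide]
      constructor
      · intro h hp; exact h (by rw [hp]; simp)
      · intro h hp
        exact h ((hofl p ("UNKNOWN" : String).toList).mp (by simpa using hp))
  rw [hA, hB, collapse_strip_eq]
  set qs := (spU name.toList).filter (fun p => p ≠ ("UNKNOWN" : String).toList) with hqs
  have hff : (spU name.toList).filter
        (fun p => p ≠ ([] : List Char) && p ≠ ("UNKNOWN" : String).toList)
      = qs.filter (fun p => p ≠ ([] : List Char)) := by
    rw [hqs, List.filter_filter]
  rw [hff]
  by_cases hq : qs = []
  · rw [hq]
    decide
  · rw [spU_join qs hq (fun q hq' => spU_no_underscore name.toList q (List.mem_of_mem_filter hq'))]
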